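-- pv_equiv track=rewrite | github.com/Lyrio-Real-Estate/LyrioChatbots | bots/buyer_bot/buyer_bot.py | _should_advance_question
-- ===== SOURCE A (Python) =====
-- from typing import Any, Dict, List, Optional
--
-- def _should_advance_question(extracted_data: Dict[str, Any], current_q: int) -> bool:
--     if current_q == 1:
--         # Require at least a price or bedroom/sqft count to advance — location name alone is insufficient
--         return any(k in extracted_data for k in ["beds_min", "sqft_min", "price_max", "price_min"])
--     if current_q == 2:
--         return "preapproved" in extracted_data
--     if current_q == 3:
--         return "timeline_days" in extracted_data
--     if current_q == 4:
--         return "motivation" in extracted_data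
--     return False
-- ===== SOURCE B (Python) =====
-- # B: inverted iteration -- scan the extracted data once, classifying each present
-- # key via an inverse key->question map; advance iff some key classifies to current_q.
-- # (A iterates over per-question candidate key lists and tests membership in the dict.)
-- _KEY_TO_QUESTION = {
--     "beds_min": 1,
--     "sqft_min": 1,
--     "price_max": 1,
--     "price_min": 1,
--     "preapproved": 2,
--     "timeline_days": 3,
--     "motivation": 4,
-- }
--
-- def _should_advance_question(extracted_data, current_q):
--     return any(_KEY_TO_QUESTION.get(k) == current_q for k in extracted_data)
-- ===== Notes on version B (the rewrite author's own statement) =====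
-- stated objective: alternative
-- what changed: Inverted the traversal: instead of branching on the question and scanning its candidate key list for membership in the dict, B makes a single pass over the extracted data itself, classifying each present key through an inverse key-to-question map and checking whether any classifies to current_q.
import Mathlib
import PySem

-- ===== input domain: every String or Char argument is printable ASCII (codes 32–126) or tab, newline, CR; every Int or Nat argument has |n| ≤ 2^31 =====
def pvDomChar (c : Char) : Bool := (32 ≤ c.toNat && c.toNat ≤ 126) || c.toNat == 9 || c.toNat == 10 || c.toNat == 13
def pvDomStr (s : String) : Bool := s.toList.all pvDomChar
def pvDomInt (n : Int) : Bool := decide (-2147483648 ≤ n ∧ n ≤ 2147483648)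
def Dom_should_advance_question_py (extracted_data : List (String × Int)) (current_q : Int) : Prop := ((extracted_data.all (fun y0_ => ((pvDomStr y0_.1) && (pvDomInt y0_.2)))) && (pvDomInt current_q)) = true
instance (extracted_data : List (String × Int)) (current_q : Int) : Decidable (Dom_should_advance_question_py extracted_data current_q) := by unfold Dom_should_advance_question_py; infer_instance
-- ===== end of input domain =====

-- B inverts the traversal: one pass over the data, classifying each key via an inverse key→question map (objective: alternative).

-- ===== PORT A =====
-- A: four-way if/elif chain; each branch scans its candidate keys for membership in the data
def should_advance_question_py (extracted_data : List (String × Int)) (current_q : Int) : Bool :=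
  if current_q = 1 then
    ["beds_min", "sqft_min", "price_max", "price_min"].any
      (fun k => extracted_data.any (fun p => p.1 == k))
  else if current_q = 2 then
    extracted_data.any (fun p => p.1 == "preapproved")
  else if current_q = 3 then
    extracted_data.any (fun p => p.1 == "timeline_days")
  else if current_q = 4 then
    extracted_data.any (fun p => p.1 == "motivation")
  else
    false

-- ===== PORT B =====
-- B: constant inverse map key -> question, then one pass over the data
def keyToQuestionTable : PySem.Dict String Int :=
  PySem.Dict.ofList
    [("beds_min", 1), ("sqft_min", 1), ("price_max", 1), ("price_min", 1),
     ("preapproved", 2), ("timeline_days", 3), ("motivation", 4)]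

def should_advance_question_py_alt (extracted_data : List (String × Int)) (current_q : Int) : Bool :=
  extracted_data.any (fun p => PySem.Dict.get? keyToQuestionTable p.1 == some current_q)

-- ===== PRECONDITION & SPEC =====
def Spec_should_advance_question_py (extracted_data : List (String × Int)) (current_q : Int) (out : Bool) : Prop := out = should_advance_question_py_alt extracted_data current_q
instance (extracted_data : List (String × Int)) (current_q : Int) (out : Bool) : Decidable (Spec_should_advance_question_py extracted_data current_q out) := by unfold Spec_should_advance_question_py; infer_instance

-- ===== CLAIM (what is proved, stated in full; the proofs are below) =====
def Claim_equal_should_advance_question_py : Prop := ∀ (extracted_data : List (String × Int)) (current_q : Int), Dom_should_advance_question_py extracted_data current_q → Spec_should_advance_question_py extracted_data current_q (should_advance_question_py extracted_data current_q)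

-- ===== LEMMAS AND PROOFS =====

-- evaluate B's constant lookup on an arbitrary key
theorem lookup_eval (s : String) :
    PySem.Dict.get? keyToQuestionTable s =
      (if s = "beds_min" then some 1 else if s = "sqft_min" then some 1
       else if s = "price_max" then some 1 else if s = "price_min" then some 1
       else if s = "preapproved" then some 2 else if s = "timeline_days" then some 3
       else if s = "motivation" then some 4 else none) := by
  have h : keyToQuestionTable.items =
      [("beds_min", 1), ("sqft_min", 1), ("price_max", 1), ("price_min", 1),
       ("preapproved", 2), ("timeline_days", 3), ("motivation", 4)] := by decide
  simp only [PySem.Dict.get?, h, List.find?]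
  split_ifs with h1 h2 h3 h4 h5 h6 h7
  all_goals try (subst_vars; rfl)
  rw [show ("beds_min" == s) = false from beq_eq_false_iff_ne.mpr (fun h => h1 h.symm)]
  rw [show ("sqft_min" == s) = false from beq_eq_false_iff_ne.mpr (fun h => h2 h.symm)]
  rw [show ("price_max" == s) = false from beq_eq_false_iff_ne.mpr (fun h => h3 h.symm)]
  rw [show ("price_min" == s) = false from beq_eq_false_iff_ne.mpr (fun h => h4 h.symm)]
  rw [show ("preapproved" == s) = false from beq_eq_false_iff_ne.mpr (fun h => h5 h.symm)]
  rw [show ("timeline_days" == s) = false from beq_eq_false_iff_ne.mpr (fun h => h6 h.symm)]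
  rw [show ("motivation" == s) = false from beq_eq_false_iff_ne.mpr (fun h => h7 h.symm)]
  rfl

-- swap the two nested `any`s of A's question-1 branch
theorem any_swap (ed : List (String × Int)) (ks : List String) :
    ks.any (fun k => ed.any (fun p => p.1 == k))
      = ed.any (fun p => ks.any (fun k => p.1 == k)) := by
  rw [Bool.eq_iff_iff]
  simp only [List.any_eq_true]
  constructor
  · rintro ⟨k, hk, p, hp, e⟩; exact ⟨p, hp, k, hk, e⟩
  · rintro ⟨p, hp, k, hk, e⟩; exact ⟨k, hk, p, hp, e⟩

-- per-element agreement of the two classifications, for each question number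
theorem point_q1 (s : String) :
    (["beds_min", "sqft_min", "price_max", "price_min"].any (fun k => s == k))
      = (PySem.Dict.get? keyToQuestionTable s == some 1) := by
  rw [lookup_eval]; split_ifs with a b c d <;> simp_all

theorem point_q2 (s : String) :
    (s == "preapproved") = (PySem.Dict.get? keyToQuestionTable s == some 2) := by
  rw [lookup_eval]; split_ifs <;> simp_all

theorem point_q3 (s : String) :
    (s == "timeline_days") = (PySem.Dict.get? keyToQuestionTable s == some 3) := by
  rw [lookup_eval]; split_ifs <;> simp_all

theorem point_q4 (s : String) :
    (s == "motivation") = (PySem.Dict.get? keyToQuestionTable s == some 4) := by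
  rw [lookup_eval]; split_ifs <;> simp_all

theorem point_other (s : String) (q : Int) (h1 : q ≠ 1) (h2 : q ≠ 2) (h3 : q ≠ 3) (h4 : q ≠ 4) :
    (PySem.Dict.get? keyToQuestionTable s == some q) = false := by
  rw [lookup_eval]; split_ifs <;> simp_all <;> omega

theorem should_advance_eq (extracted_data : List (String × Int)) (current_q : Int) :
    should_advance_question_py extracted_data current_q
      = should_advance_question_py_alt extracted_data current_q := by
  unfold should_advance_question_py should_advance_question_py_alt
  by_cases h1 : current_q = 1
  · subst h1
    rw [if_pos rfl, any_swap]
    exact List.any_congr rfl (fun p => point_q1 p.1)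
  by_cases h2 : current_q = 2
  · subst h2
    rw [if_neg (by decide), if_pos rfl]
    exact List.any_congr rfl (fun p => point_q2 p.1)
  by_cases h3 : current_q = 3
  · subst h3
    rw [if_neg (by decide), if_neg (by decide), if_pos rfl]
    exact List.any_congr rfl (fun p => point_q3 p.1)
  by_cases h4 : current_q = 4
  · subst h4
    rw [if_neg (by decide), if_neg (by decide), if_neg (by decide), if_pos rfl]
    exact List.any_congr rfl (fun p => point_q4 p.1)
  · rw [if_neg h1, if_neg h2, if_neg h3, if_neg h4]
    symm
    simp only [List.any_eq_false]
    intro p _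
    simp [point_other p.1 current_q h1 h2 h3 h4]

-- ===== VERDICT (by name: the statement is the Claim_ definition above) =====
theorem should_advance_question_py_spec : Claim_equal_should_advance_question_py := by
  intro ed q _
  unfold Spec_should_advance_question_py
  exact should_advance_eq ed q
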